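-- pv_equiv track=rewrite | github.com/lightbug-io/toit-lightbug | tools/bitmap_toit.py | _trim_grid
-- ===== SOURCE A (Python) =====
-- def _trim_grid(
--     grid: list[list[int]]
-- ) -> tuple[list[list[int]], tuple[int, int, int, int] | None]:
--     height = len(grid)
--     if height == 0:
--         return grid, None
--     width = len(grid[0])
--     min_x = width
--     min_y = height
--     max_x = -1
--     max_y = -1
--     for y, row in enumerate(grid):
--         for x, bit in enumerate(row):
--             if bit:
--                 min_x = min(min_x, x)
--                 min_y = min(min_y, y)
--                 max_x = max(max_x, x)
--                 max_y = max(max_y, y)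
--     if max_x == -1:
--         return grid, None
--     trimmed = [row[min_x : max_x + 1] for row in grid[min_y : max_y + 1]]
--     return trimmed, (min_x, min_y, max_x, max_y)
-- ===== SOURCE B (Python) =====
-- def _trim_grid(
--     grid: list[list[int]]
-- ) -> tuple[list[list[int]], tuple[int, int, int, int] | None]:
--     if not any(any(row) for row in grid):
--         return grid, None
--     top = 0
--     while not any(grid[top]):
--         top += 1
--     bottom = len(grid) - 1
--     while not any(grid[bottom]):
--         bottom -= 1
--     width = max(len(row) for row in grid)
--     left = 0
--     while not any(left < len(row) and row[left] for row in grid):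
--         left += 1
--     right = width - 1
--     while not any(right < len(row) and row[right] for row in grid):
--         right -= 1
--     return [row[left : right + 1] for row in grid[top : bottom + 1]], (left, top, right, bottom)
-- ===== Notes on version B (the rewrite author's own statement) =====
-- stated objective: alternative
-- what changed: Replaces A's single fused scan of all cells with four running min/max accumulators by a border-shrinking algorithm: four independent while loops move the top/bottom row boundaries and left/right column boundaries inward until they hit content (column probes test all rows at one index), then the same slicing.
-- intended difference: On ragged grids that contain a nonzero cell but whose every nonzero cell sits in a column index strictly greater than len(grid[0]), A returns min_x = len(grid[0]) (its initialiser, never beaten by any real column), so its crop keeps spurious all-zero columns; B returns the true leftmost nonzero column, which is the intended bounding box. — e.g. on _trim_grid([[0], [0, 0, 1]]): A returns ([[0, 1]], some (1, 1, 2, 1)), B returns ([[1]], some (2, 1, 2, 1))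
import Mathlib
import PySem

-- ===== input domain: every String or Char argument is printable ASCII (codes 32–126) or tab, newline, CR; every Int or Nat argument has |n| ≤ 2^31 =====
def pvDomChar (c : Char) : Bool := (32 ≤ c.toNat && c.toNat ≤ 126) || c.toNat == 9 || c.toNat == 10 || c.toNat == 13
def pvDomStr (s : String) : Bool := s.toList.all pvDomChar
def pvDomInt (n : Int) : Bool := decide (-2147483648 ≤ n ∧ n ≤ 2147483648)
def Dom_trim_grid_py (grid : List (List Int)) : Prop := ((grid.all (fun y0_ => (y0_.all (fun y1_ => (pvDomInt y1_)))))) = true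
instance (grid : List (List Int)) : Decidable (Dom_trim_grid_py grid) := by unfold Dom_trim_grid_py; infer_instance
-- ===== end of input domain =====

-- B replaces A's fused all-cells scan with four accumulators by a border-shrinking
-- algorithm (four while loops move the top/bottom/left/right boundaries inward until
-- they hit content); objective: alternative. On ragged grids whose nonzero cells all
-- lie right of column len(grid[0]), A's min_x is stuck at its len(grid[0]) initialiser
-- and B returns the intended leftmost nonzero column (see D_).

-- ===== PORT A =====
def trim_grid_py (grid : List (List Int)) : List (List Int) × (Option (Int × Int × Int × Int)) :=
  let height : Int := (grid.length : Int)
  if height = 0 then (grid, none) else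
  let width : Int := ((grid.headD []).length : Int)  -- grid[0]; guarded by height ≠ 0
  let st : Int × Int × Int × Int :=
    (PySem.List.enumerate grid 0).foldl (fun st p =>
      (PySem.List.enumerate p.2 0).foldl (fun st q =>
        if q.2 ≠ 0 then (min st.1 q.1, min st.2.1 p.1, max st.2.2.1 q.1, max st.2.2.2 p.1)
        else st) st)
      (width, height, -1, -1)
  if st.2.2.1 = -1 then (grid, none)
  else ((PySem.List.slice grid (some st.2.1) (some (st.2.2.2 + 1))).map
          (fun row => PySem.List.slice row (some st.1) (some (st.2.2.1 + 1))),
        some (st.1, st.2.1, st.2.2.1, st.2.2.2))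

-- ===== PORT B =====
-- `c < len(row) and row[c]`, probed over all rows at one column index c
def pvHit (g : List (List Int)) (c : Int) : Bool :=
  g.any (fun row => decide (c < (row.length : Int)) && decide (((PySem.List.pyGet? row c).getD 0) ≠ 0))

-- `while not any(grid[top]): top += 1` — scan of the remaining suffix of rows
def pvFindTop : List (List Int) → Int → Int
  | [], t => t
  | r :: g, t => if r.any (· ≠ 0) then t else pvFindTop g (t + 1)

-- `while not any(grid[bottom]): bottom -= 1` — applied to the reversed row list
def pvFindBottom : List (List Int) → Int → Int
  | [], b => b
  | r :: g, b => if r.any (· ≠ 0) then b else pvFindBottom g (b - 1)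

-- `while not any(left < len(row) and row[left] for row in grid): left += 1`
-- (fuel = width only makes the loop total; B's guard ensures it stops before fuel runs out)
def pvFindLeft (g : List (List Int)) : Int → Nat → Int
  | c, 0 => c
  | c, f + 1 => if pvHit g c then c else pvFindLeft g (c + 1) f

-- `while not any(right < len(row) and row[right] for row in grid): right -= 1`
def pvFindRight (g : List (List Int)) : Int → Nat → Int
  | c, 0 => c
  | c, f + 1 => if pvHit g c then c else pvFindRight g (c - 1) f

def trim_grid_py_alt (grid : List (List Int)) : List (List Int) × (Option (Int × Int × Int × Int)) :=
  if (grid.any (fun row => row.any (· ≠ 0))) = false then (grid, none)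
  else
    let top := pvFindTop grid 0
    let bottom := pvFindBottom grid.reverse ((grid.length : Int) - 1)
    let width := (PySem.List.max? (grid.map (fun r => (r.length : Int))) (fun x => x)).getD 0
    let left := pvFindLeft grid 0 width.toNat
    let right := pvFindRight grid (width - 1) width.toNat
    ((PySem.List.slice grid (some top) (some (bottom + 1))).map
       (fun row => PySem.List.slice row (some left) (some (right + 1))),
     some (left, top, right, bottom))

-- ===== PRECONDITION & SPEC =====
-- On ragged grids with some nonzero cell where every nonzero cell sits in a column index
-- strictly greater than len(grid[0]), A returns min_x = len(grid[0]) (its initialiser,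
-- never beaten), so its crop keeps spurious all-zero columns; B returns the true leftmost
-- nonzero column, the intended bounding box.
def D_trim_grid_py (grid : List (List Int)) : Prop :=
  (grid.all (fun r => r.all (fun b => b == 0))) = false ∧
  (grid.all (fun r => (r.take ((grid.headD []).length + 1)).all (fun b => b == 0))) = true
instance (grid : List (List Int)) : Decidable (D_trim_grid_py grid) := by
  unfold D_trim_grid_py; infer_instance
def Spec_trim_grid_py (grid : List (List Int)) (out : List (List Int) × (Option (Int × Int × Int × Int))) : Prop := ¬ D_trim_grid_py grid → out = trim_grid_py_alt grid
instance (grid : List (List Int)) (out : List (List Int) × (Option (Int × Int × Int × Int))) : Decidable (Spec_trim_grid_py grid out) := by unfold Spec_trim_grid_py; infer_instance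
def pvDiffWitness_trim_grid_py : List (List Int) := [[0], [0, 0, 1]]
def pvDiffWitnessOut_trim_grid_py : (List (List Int) × (Option (Int × Int × Int × Int))) × (List (List Int) × (Option (Int × Int × Int × Int))) :=
  (([[0, 1]], some (1, 1, 2, 1)), ([[1]], some (2, 1, 2, 1)))

-- ===== CLAIM (what is proved, stated in full; the proofs are below) =====
def Claim_unchanged_trim_grid_py : Prop := ∀ (grid : List (List Int)), Dom_trim_grid_py grid → Spec_trim_grid_py grid (trim_grid_py grid)
def Claim_changed_trim_grid_py : Prop := Dom_trim_grid_py (pvDiffWitness_trim_grid_py) ∧ D_trim_grid_py (pvDiffWitness_trim_grid_py) ∧ trim_grid_py (pvDiffWitness_trim_grid_py) = pvDiffWitnessOut_trim_grid_py.1 ∧ trim_grid_py_alt (pvDiffWitness_trim_grid_py) = pvDiffWitnessOut_trim_grid_py.2 ∧ pvDiffWitnessOut_trim_grid_py.1 ≠ pvDiffWitnessOut_trim_grid_py.2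
def Claim_exact_trim_grid_py : Prop := ∀ (grid : List (List Int)), Dom_trim_grid_py grid → D_trim_grid_py grid → trim_grid_py grid ≠ trim_grid_py_alt grid

-- ===== LEMMAS AND PROOFS =====

-- truthy column indices of one row, in order
def pvTxs (row : List Int) : List Int :=
  (PySem.List.enumerate row 0).filterMap (fun q => if q.2 ≠ 0 then some q.1 else none)

-- all truthy column indices of the grid, in traversal order
def pvXs (g : List (List Int)) : List Int := g.flatMap pvTxs

-- indices (from s) of rows with some truthy cell
def pvYs : List (List Int) → Int → List Int
  | [], _ => []
  | r :: g, s => (if r.any (· ≠ 0) then [s] else []) ++ pvYs g (s + 1)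

-- A's per-cell state update at row y
def pvStep4 (y : Int) (st : Int × Int × Int × Int) (x : Int) : Int × Int × Int × Int :=
  (min st.1 x, min st.2.1 y, max st.2.2.1 x, max st.2.2.2 y)

theorem pvYs_cons_true (r : List Int) (g : List (List Int)) (s : Int)
    (h : (r.any fun x => decide (x ≠ 0)) = true) : pvYs (r :: g) s = s :: pvYs g (s + 1) := by
  rw [pvYs, h, if_pos rfl]; rfl

theorem pvYs_cons_false (r : List Int) (g : List (List Int)) (s : Int)
    (h : (r.any fun x => decide (x ≠ 0)) = false) : pvYs (r :: g) s = pvYs g (s + 1) := by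
  rw [pvYs, h, if_neg Bool.false_ne_true]; rfl

theorem pvFoldl_guard (y : Int) : ∀ (ps : List (Int × Int)) (st : Int × Int × Int × Int),
    ps.foldl (fun st q => if q.2 ≠ 0 then pvStep4 y st q.1 else st) st
      = ((ps.filterMap (fun q => if q.2 ≠ 0 then some q.1 else none)).foldl (pvStep4 y) st) := by
  intro ps
  induction ps with
  | nil => intro st; rfl
  | cons q ps ih =>
    intro st
    rw [List.foldl_cons, List.filterMap_cons]
    by_cases h : q.2 ≠ 0
    · rw [if_pos h, if_pos h]; exact ih _
    · rw [if_neg h, if_neg h]; exact ih _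

theorem pvFoldl_step4 (y : Int) : ∀ (l : List Int) (st : Int × Int × Int × Int),
    l.foldl (pvStep4 y) st
      = (l.foldl min st.1,
         if l.isEmpty then st.2.1 else min st.2.1 y,
         l.foldl max st.2.2.1,
         if l.isEmpty then st.2.2.2 else max st.2.2.2 y) := by
  intro l
  induction l with
  | nil => intro st; rfl
  | cons x l ih =>
    intro st
    simp only [List.foldl_cons, ih, pvStep4, List.isEmpty_cons]
    cases hl : l.isEmpty <;> simp [min_assoc, max_assoc]

theorem pvTxs_nil_iff (r : List Int) : pvTxs r = [] ↔ r.any (· ≠ 0) = false := by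
  unfold pvTxs
  rw [List.filterMap_eq_nil_iff]
  constructor
  · intro h
    simp only [List.any_eq_false]
    intro b hb
    rcases List.getElem_of_mem hb with ⟨k, hk, rfl⟩
    have h2 := h (((0 : Int) + k, r[k])) (by
      rw [PySem.List.mem_enumerate_iff]; exact ⟨k, hk, rfl⟩)
    by_cases hne : r[k] ≠ 0
    · rw [if_pos hne] at h2; cases h2
    · simpa using hne
  · intro h q hq
    rw [PySem.List.mem_enumerate_iff] at hq
    rcases hq with ⟨k, hk, rfl⟩
    simp only [List.any_eq_false] at h
    have h3 := h r[k] (List.getElem_mem hk)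
    rw [if_neg (by simpa using h3)]

theorem pvOuter (g : List (List Int)) : ∀ (s : Int) (st : Int × Int × Int × Int),
    (PySem.List.enumerate g s).foldl (fun st p =>
        (PySem.List.enumerate p.2 0).foldl (fun st q =>
          if q.2 ≠ 0 then (min st.1 q.1, min st.2.1 p.1, max st.2.2.1 q.1, max st.2.2.2 p.1)
          else st) st) st
      = ((pvXs g).foldl min st.1, (pvYs g s).foldl min st.2.1,
         (pvXs g).foldl max st.2.2.1, (pvYs g s).foldl max st.2.2.2) := by
  induction g with
  | nil => intro s st; simp [PySem.List.enumerate_nil, pvXs, pvYs]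
  | cons r g ih =>
    intro s st
    rw [PySem.List.enumerate_cons]
    rw [List.foldl_cons]
    have hinner :
        (PySem.List.enumerate r 0).foldl (fun st q =>
            if q.2 ≠ 0 then (min st.1 q.1, min st.2.1 s, max st.2.2.1 q.1, max st.2.2.2 s)
            else st) st
          = (pvTxs r).foldl (pvStep4 s) st := pvFoldl_guard s _ st
    rw [hinner, pvFoldl_step4, ih]
    have hxs : pvXs (r :: g) = pvTxs r ++ pvXs g := rfl
    cases hany : r.any (fun x => decide (x ≠ 0)) with
    | true =>
      have hne : (pvTxs r).isEmpty = false := by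
        rw [List.isEmpty_eq_false_iff]
        intro h0
        rw [pvTxs_nil_iff] at h0
        rw [hany] at h0; cases h0
      rw [hxs, pvYs_cons_true _ _ _ hany, hne]
      simp only [List.foldl_append, List.foldl_cons, if_neg Bool.false_ne_true]
    | false =>
      have hnil : pvTxs r = [] := by rw [pvTxs_nil_iff, hany]
      rw [hxs, pvYs_cons_false _ _ _ hany, hnil]
      simp

theorem pvFoldl_min_swap : ∀ (l : List Int) (a b : Int),
    l.foldl min (min a b) = min a (l.foldl min b) := by
  intro l
  induction l with
  | nil => intro a b; rfl
  | cons c l ih => intro a b; simp only [List.foldl_cons, min_assoc, ih]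

theorem pvFoldl_min_le_init : ∀ (l : List Int) (a : Int), l.foldl min a ≤ a := by
  intro l
  induction l with
  | nil => intro a; exact le_refl a
  | cons c l ih =>
    intro a
    calc (c :: l).foldl min a = l.foldl min (min a c) := rfl
    _ ≤ min a c := ih _
    _ ≤ a := min_le_left _ _

theorem pvFoldl_min_le_mem : ∀ (l : List Int) (a x : Int), x ∈ l → l.foldl min a ≤ x := by
  intro l
  induction l with
  | nil => intro a x hx; cases hx
  | cons c l ih =>
    intro a x hx
    rcases List.mem_cons.mp hx with rfl | hx
    · calc (x :: l).foldl min a = l.foldl min (min a x) := rfl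
      _ ≤ min a x := pvFoldl_min_le_init _ _
      _ ≤ x := min_le_right _ _
    · exact ih _ x hx

theorem pvFoldl_max_ge_init : ∀ (l : List Int) (a : Int), a ≤ l.foldl max a := by
  intro l
  induction l with
  | nil => intro a; exact le_refl a
  | cons c l ih =>
    intro a
    calc a ≤ max a c := le_max_left _ _
    _ ≤ l.foldl max (max a c) := ih _
    _ = (c :: l).foldl max a := rfl

theorem pvFoldl_max_ge_mem : ∀ (l : List Int) (a x : Int), x ∈ l → x ≤ l.foldl max a := by
  intro l
  induction l with
  | nil => intro a x hx; cases hx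
  | cons c l ih =>
    intro a x hx
    rcases List.mem_cons.mp hx with rfl | hx
    · calc x ≤ max a x := le_max_right _ _
      _ ≤ l.foldl max (max a x) := pvFoldl_max_ge_init _ _
      _ = (x :: l).foldl max a := rfl
    · exact ih _ x hx

theorem pvFoldl_min_mem : ∀ (l : List Int) (a : Int), l.foldl min a ∈ a :: l := by
  intro l
  induction l with
  | nil => intro a; exact List.mem_cons_self
  | cons c l ih =>
    intro a
    have h := ih (min a c)
    rcases List.mem_cons.mp h with heq | hmem
    · show l.foldl min (min a c) ∈ a :: c :: l
      rw [heq]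
      rcases le_total a c with hac | hca
      · rw [min_eq_left hac]; exact List.mem_cons_self
      · rw [min_eq_right hca]; exact List.mem_cons_of_mem _ List.mem_cons_self
    · exact List.mem_cons_of_mem _ (List.mem_cons_of_mem _ hmem)

theorem pvFoldl_max_mem : ∀ (l : List Int) (a : Int), l.foldl max a ∈ a :: l := by
  intro l
  induction l with
  | nil => intro a; exact List.mem_cons_self
  | cons c l ih =>
    intro a
    have h := ih (max a c)
    rcases List.mem_cons.mp h with heq | hmem
    · show l.foldl max (max a c) ∈ a :: c :: l
      rw [heq]
      rcases le_total a c with hac | hca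
      · rw [max_eq_right hac]; exact List.mem_cons_of_mem _ List.mem_cons_self
      · rw [max_eq_left hca]; exact List.mem_cons_self
    · exact List.mem_cons_of_mem _ (List.mem_cons_of_mem _ hmem)

theorem pvFoldl_min_eq_init : ∀ (l : List Int) (a : Int), (∀ x ∈ l, a ≤ x) → l.foldl min a = a := by
  intro l
  induction l with
  | nil => intro a _; rfl
  | cons c l ih =>
    intro a h
    have hac : min a c = a := min_eq_left (h c List.mem_cons_self)
    calc (c :: l).foldl min a = l.foldl min (min a c) := rfl
    _ = min a c := ih _ (by
        intro x hx
        exact le_trans (min_le_left _ _) (h x (List.mem_cons_of_mem _ hx)))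
    _ = a := hac

theorem pvFoldl_min_gt : ∀ (l : List Int) (a b : Int),
    b < a → (∀ x ∈ l, b < x) → b < l.foldl min a := by
  intro l
  induction l with
  | nil => intro a b h _; exact h
  | cons c l ih =>
    intro a b ha h
    exact ih (min a c) b (lt_min ha (h c List.mem_cons_self))
      (fun x hx => h x (List.mem_cons_of_mem _ hx))

theorem pvFoldl_max_sorted : ∀ (r : List Int) (x a : Int),
    (x :: r).Pairwise (· ≤ ·) → a ≤ x → (x :: r).foldl max a = r.getLastD x := by
  intro r
  induction r with
  | nil => intro x a _ hax; simpa using max_eq_right hax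
  | cons y r ih =>
    intro x a hp hax
    have hxy : x ≤ y := (List.pairwise_cons.mp hp).1 y List.mem_cons_self
    have hp' : (y :: r).Pairwise (· ≤ ·) := (List.pairwise_cons.mp hp).2
    have h1 : (x :: y :: r).foldl max a = (y :: r).foldl max (max a x) := rfl
    rw [h1, ih y (max a x) hp' (max_le (le_trans hax hxy) hxy), List.getLastD_cons]

theorem pvYs_bounds (g : List (List Int)) : ∀ (s y : Int),
    y ∈ pvYs g s → s ≤ y ∧ y < s + g.length := by
  induction g with
  | nil => intro s y hy; cases hy
  | cons r g ih =>
    intro s y hy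
    cases hany : r.any (fun x => decide (x ≠ 0)) with
    | true =>
      rw [pvYs_cons_true _ _ _ hany] at hy
      rcases List.mem_cons.mp hy with rfl | h2
      · refine ⟨le_refl _, ?_⟩
        simp only [List.length_cons]; push_cast; omega
      · rcases ih (s + 1) y h2 with ⟨h3, h4⟩
        refine ⟨by omega, ?_⟩
        simp only [List.length_cons]; push_cast at h4 ⊢; omega
    | false =>
      rw [pvYs_cons_false _ _ _ hany] at hy
      rcases ih (s + 1) y hy with ⟨h3, h4⟩
      refine ⟨by omega, ?_⟩
      simp only [List.length_cons]; push_cast at h4 ⊢; omega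

theorem pvYs_pairwise (g : List (List Int)) : ∀ s : Int, (pvYs g s).Pairwise (· ≤ ·) := by
  induction g with
  | nil => intro s; exact List.Pairwise.nil
  | cons r g ih =>
    intro s
    cases hany : r.any (fun x => decide (x ≠ 0)) with
    | true =>
      rw [pvYs_cons_true _ _ _ hany]
      refine List.pairwise_cons.mpr ⟨?_, ih (s + 1)⟩
      intro y hy
      have := (pvYs_bounds g (s + 1) y hy).1
      omega
    | false => rw [pvYs_cons_false _ _ _ hany]; exact ih (s + 1)

theorem pvYs_nil_iff (g : List (List Int)) : ∀ s : Int, pvYs g s = [] ↔ pvXs g = [] := by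
  induction g with
  | nil => intro s; simp [pvYs, pvXs]
  | cons r g ih =>
    intro s
    have hx : pvXs (r :: g) = pvTxs r ++ pvXs g := rfl
    rw [hx, List.append_eq_nil_iff, pvTxs_nil_iff]
    cases hany : r.any (fun x => decide (x ≠ 0)) with
    | true =>
      rw [pvYs_cons_true _ _ _ hany]
      simp [hany]
    | false =>
      rw [pvYs_cons_false _ _ _ hany, ih (s + 1)]
      simp

theorem pvMem_txs (r : List Int) (x : Int) :
    x ∈ pvTxs r ↔ ∃ k : Nat, ∃ _ : k < r.length, r[k] ≠ 0 ∧ x = (k : Int) := by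
  unfold pvTxs
  rw [List.mem_filterMap]
  constructor
  · rintro ⟨q, hq, hsome⟩
    rw [PySem.List.mem_enumerate_iff] at hq
    rcases hq with ⟨k, hk, rfl⟩
    by_cases h0 : r[k] ≠ 0
    · rw [if_pos h0] at hsome
      refine ⟨k, hk, h0, ?_⟩
      cases hsome
      omega
    · rw [if_neg h0] at hsome; cases hsome
  · rintro ⟨k, hk, h0, rfl⟩
    refine ⟨((0 : Int) + k, r[k]), ?_, ?_⟩
    · rw [PySem.List.mem_enumerate_iff]; exact ⟨k, hk, rfl⟩
    · rw [if_pos h0]; norm_num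

theorem pvXs_nonneg (g : List (List Int)) (x : Int) (hx : x ∈ pvXs g) : 0 ≤ x := by
  rcases List.mem_flatMap.mp hx with ⟨r, _, hxr⟩
  rcases (pvMem_txs r x).mp hxr with ⟨k, _, _, rfl⟩
  exact Int.natCast_nonneg k

-- D_'s take-prefix condition says exactly: every truthy column index exceeds width
theorem pvD_iff (g : List (List Int)) :
    (g.all (fun r => (r.take ((g.headD []).length + 1)).all (· = 0))) = true
      ↔ ∀ x ∈ pvXs g, ((g.headD []).length : Int) < x := by
  constructor
  · intro h x hx
    rcases List.mem_flatMap.mp hx with ⟨r, hr, hxr⟩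
    rcases (pvMem_txs r x).mp hxr with ⟨k, hk, h0, rfl⟩
    simp only [List.all_eq_true] at h
    have hr' := h r hr
    simp only [List.all_eq_true, decide_eq_true_eq] at hr'
    by_contra hle
    push_neg at hle
    have hkw : k < (g.headD []).length + 1 := by omega
    exact h0 (hr' r[k] (List.mem_take_iff_getElem.mpr ⟨k, by omega, by simp⟩))
  · intro h
    simp only [List.all_eq_true, decide_eq_true_eq]
    intro r hr b hb
    rcases List.mem_take_iff_getElem.mp hb with ⟨k, hk, rfl⟩
    by_contra h0
    have hx : (k : Int) ∈ pvXs g := by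
      refine List.mem_flatMap.mpr ⟨r, hr, ?_⟩
      exact (pvMem_txs r k).mpr ⟨k, by omega, h0, rfl⟩
    have := h _ hx
    omega

-- the change region, re-stated through the conditions the proofs below use
theorem pvBeqFun : (fun b : Int => b == 0) = (fun b : Int => decide (b = 0)) := by
  funext b
  by_cases h : b = 0 <;> simp [h]

theorem pvAllAny (g : List (List Int)) :
    (g.all (fun r => r.all (fun b => decide (b = 0))))
      = ! (g.any (fun r => r.any (fun x => decide (x ≠ 0)))) := by
  induction g with
  | nil => rfl
  | cons r g ih =>
    rw [List.all_cons, List.any_cons, Bool.not_or, ih]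
    congr 1
    induction r with
    | nil => rfl
    | cons a r ihr =>
      rw [List.all_cons, List.any_cons, Bool.not_or, ihr]
      congr 1
      by_cases h : a = 0 <;> simp [h]

theorem pvD_char (g : List (List Int)) :
    D_trim_grid_py g ↔
      ((g.any (fun r => r.any (· ≠ 0))) = true ∧
       (g.all (fun r => (r.take ((g.headD []).length + 1)).all (· = 0))) = true) := by
  unfold D_trim_grid_py
  rw [pvBeqFun, pvAllAny]
  constructor
  · rintro ⟨h1, h2⟩
    exact ⟨by simpa using h1, h2⟩
  · rintro ⟨h1, h2⟩
    refine ⟨?_, h2⟩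
    rw [h1]
    rfl

-- A's result, in closed form via the helper lists
theorem pvA_closed (g : List (List Int)) (hg : g ≠ []) :
    trim_grid_py g =
      (if (pvXs g).foldl max (-1) = -1 then (g, none)
       else ((PySem.List.slice g (some ((pvYs g 0).foldl min (g.length : Int)))
                (some ((pvYs g 0).foldl max (-1) + 1))).map
               (fun row => PySem.List.slice row
                  (some ((pvXs g).foldl min ((g.headD []).length : Int)))
                  (some ((pvXs g).foldl max (-1) + 1))),
             some ((pvXs g).foldl min ((g.headD []).length : Int),
                   (pvYs g 0).foldl min (g.length : Int),
                   (pvXs g).foldl max (-1),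
                   (pvYs g 0).foldl max (-1)))) := by
  unfold trim_grid_py
  have hlen : ¬ ((g.length : Int) = 0) := by
    simp only [Int.natCast_eq_zero, List.length_eq_zero_iff]
    exact hg
  simp only [hlen, if_false]
  rw [pvOuter g 0 _]

-- B's content guard agrees with pvYs emptiness
theorem pvAny_iff (g : List (List Int)) : ∀ s : Int,
    (g.any (fun r => r.any (· ≠ 0))) = false ↔ pvYs g s = [] := by
  induction g with
  | nil => intro s; simp [pvYs]
  | cons r g ih =>
    intro s
    cases hany : r.any (fun x => decide (x ≠ 0)) with
    | true =>
      rw [pvYs_cons_true _ _ _ hany]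
      constructor
      · intro hfalse
        rw [List.any_cons, hany] at hfalse
        simp at hfalse
      · intro hcons
        exact absurd hcons (List.cons_ne_nil _ _)
    | false =>
      rw [pvYs_cons_false _ _ _ hany, ← ih (s + 1)]
      rw [List.any_cons, hany]
      simp

-- pvHit at a nonnegative column index is membership in pvXs
theorem pvHit_iff (g : List (List Int)) (c : Int) (hc : 0 ≤ c) :
    pvHit g c = true ↔ c ∈ pvXs g := by
  unfold pvHit
  rw [List.any_eq_true]
  constructor
  · rintro ⟨r, hr, hcond⟩
    rw [Bool.and_eq_true, decide_eq_true_eq, decide_eq_true_eq] at hcond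
    rcases hcond with ⟨hlt, hne⟩
    have hlt' : c.toNat < r.length := by omega
    rw [PySem.List.pyGet?_of_nonneg r hc, List.getElem?_eq_getElem hlt'] at hne
    simp only [Option.getD_some] at hne
    refine List.mem_flatMap.mpr ⟨r, hr, ?_⟩
    exact (pvMem_txs r c).mpr ⟨c.toNat, hlt', hne, by omega⟩
  · intro hx
    rcases List.mem_flatMap.mp hx with ⟨r, hr, hxr⟩
    rcases (pvMem_txs r c).mp hxr with ⟨k, hk, hne, hck⟩
    refine ⟨r, hr, ?_⟩
    rw [Bool.and_eq_true, decide_eq_true_eq, decide_eq_true_eq]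
    refine ⟨by omega, ?_⟩
    rw [PySem.List.pyGet?_of_nonneg r hc, List.getElem?_eq_getElem (by omega : c.toNat < r.length)]
    simp only [Option.getD_some]
    have hck' : k = c.toNat := by omega
    subst hck'
    exact hne

-- every truthy column index is below every bound on all row lengths
theorem pvXs_lt_width (g : List (List Int)) (W : Int)
    (hW : ∀ r ∈ g, (r.length : Int) ≤ W) (x : Int) (hx : x ∈ pvXs g) : x < W := by
  rcases List.mem_flatMap.mp hx with ⟨r, hr, hxr⟩
  rcases (pvMem_txs r x).mp hxr with ⟨k, hk, _, rfl⟩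
  have := hW r hr
  omega

theorem pvFindTop_spec (g : List (List Int)) : ∀ (s y0 : Int) (yr : List Int),
    pvYs g s = y0 :: yr → pvFindTop g s = y0 := by
  induction g with
  | nil => intro s y0 yr h; cases h
  | cons r g ih =>
    intro s y0 yr h
    cases hany : r.any (fun x => decide (x ≠ 0)) with
    | true =>
      rw [pvYs_cons_true _ _ _ hany] at h
      have h1 : s = y0 := (List.cons_eq_cons.mp h).1
      rw [pvFindTop, hany, if_pos rfl]
      exact h1
    | false =>
      rw [pvYs_cons_false _ _ _ hany] at h
      rw [pvFindTop, hany, if_neg Bool.false_ne_true]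
      exact ih (s + 1) y0 yr h

theorem pvYs_append (a b : List (List Int)) : ∀ s : Int,
    pvYs (a ++ b) s = pvYs a s ++ pvYs b (s + a.length) := by
  induction a with
  | nil => intro s; simp [pvYs]
  | cons r a ih =>
    intro s
    cases hany : r.any (fun x => decide (x ≠ 0)) with
    | true =>
      rw [List.cons_append, pvYs_cons_true _ _ _ hany, pvYs_cons_true _ _ _ hany, ih (s + 1)]
      simp only [List.length_cons, List.cons_append]
      push_cast
      ring_nf
    | false =>
      rw [List.cons_append, pvYs_cons_false _ _ _ hany, pvYs_cons_false _ _ _ hany, ih (s + 1)]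
      simp only [List.length_cons]
      push_cast
      ring_nf

theorem pvGetLastD_concat (xs : List Int) (v d : Int) : (xs ++ [v]).getLastD d = v := by
  induction xs generalizing d with
  | nil => rfl
  | cons a xs ih => rw [List.cons_append, List.getLastD_cons, ih]

theorem pvFindBottom_spec (g : List (List Int)) : ∀ (s : Int) (d : Int),
    pvYs g s ≠ [] → pvFindBottom g.reverse (s + g.length - 1) = (pvYs g s).getLastD d := by
  induction g using List.reverseRecOn with
  | nil => intro s d h; exact absurd rfl h
  | append_singleton g' r ih =>
    intro s d h
    rw [List.reverse_append, List.reverse_singleton, List.singleton_append]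
    rw [pvYs_append] at h ⊢
    cases hany : r.any (fun x => decide (x ≠ 0)) with
    | true =>
      rw [pvFindBottom, hany, if_pos rfl]
      rw [pvYs_cons_true r [] _ hany]
      rw [show pvYs ([] : List (List Int)) (s + (g'.length : Int) + 1) = [] from rfl]
      rw [pvGetLastD_concat]
      simp only [List.length_append, List.length_singleton]
      push_cast
      ring
    | false =>
      rw [pvFindBottom, hany, if_neg Bool.false_ne_true]
      have hnil : pvYs [r] (s + (g'.length : Int)) = [] := by
        rw [pvYs_cons_false r [] _ hany]
        rfl
      rw [hnil, List.append_nil] at h ⊢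
      have harg : s + ((g' ++ [r]).length : Int) - 1 - 1 = s + (g'.length : Int) - 1 := by
        simp only [List.length_append, List.length_singleton]
        push_cast
        ring
      rw [harg]
      exact ih s d h

theorem pvFindLeft_spec (g : List (List Int)) (m : Int)
    (hm : pvHit g m = true) (hmin : ∀ x, 0 ≤ x → pvHit g x = true → m ≤ x) (hm0 : 0 ≤ m) :
    ∀ (f : Nat) (c : Int), 0 ≤ c → c ≤ m → (m - c).toNat ≤ f → pvFindLeft g c f = m := by
  intro f
  induction f with
  | zero =>
    intro c hc0 hcm hf
    have : c = m := by omega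
    rw [pvFindLeft, this]
  | succ f ih =>
    intro c hc0 hcm hf
    rw [pvFindLeft]
    by_cases hh : pvHit g c = true
    · have := hmin c hc0 hh
      have : c = m := by omega
      rw [if_pos hh, this]
    · rw [if_neg hh]
      have hne : c ≠ m := by intro h; rw [h] at hh; exact hh hm
      exact ih (c + 1) (by omega) (by omega) (by omega)

theorem pvFindRight_spec (g : List (List Int)) (M : Int)
    (hM : pvHit g M = true) (hmax : ∀ x, 0 ≤ x → pvHit g x = true → x ≤ M) (hM0 : 0 ≤ M) :
    ∀ (f : Nat) (c : Int), M ≤ c → (c - M).toNat ≤ f → pvFindRight g c f = M := by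
  intro f
  induction f with
  | zero =>
    intro c hMc hf
    have : c = M := by omega
    rw [pvFindRight, this]
  | succ f ih =>
    intro c hMc hf
    rw [pvFindRight]
    by_cases hh : pvHit g c = true
    · have := hmax c (by omega) hh
      have : c = M := by omega
      rw [if_pos hh, this]
    · rw [if_neg hh]
      have hne : c ≠ M := by intro h; rw [h] at hh; exact hh hM
      exact ih (c - 1) (by omega) (by omega)

-- B's result when the grid has content, in closed form via pvXs/pvYs
theorem pvB_closed (g : List (List Int)) (y0 : Int) (yr : List Int) (x0 : Int) (xr : List Int)
    (hY : pvYs g 0 = y0 :: yr) (hX : pvXs g = x0 :: xr) :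
    trim_grid_py_alt g =
      ((PySem.List.slice g (some y0) (some (yr.getLastD y0 + 1))).map
         (fun row => PySem.List.slice row (some (xr.foldl min x0))
            (some (xr.foldl max x0 + 1))),
       some (xr.foldl min x0, y0, xr.foldl max x0, yr.getLastD y0)) := by
  have hg : g ≠ [] := by
    rintro rfl
    rw [show pvYs [] 0 = [] from rfl] at hY
    cases hY
  have hguard : ¬ ((g.any (fun row => row.any (· ≠ 0))) = false) := by
    intro h
    rw [pvAny_iff g 0, hY] at h
    cases h
  unfold trim_grid_py_alt
  rw [if_neg hguard]
  -- width facts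
  rcases hmap : g.map (fun r => (r.length : Int)) with _ | ⟨a, t⟩
  · exact absurd (List.map_eq_nil_iff.mp hmap) hg
  · have hW : PySem.List.max? (g.map (fun r => (r.length : Int))) (fun x => x)
        = some (t.foldl max a) := by
      rw [hmap, PySem.List.max?_id_cons]
    have hWbound : ∀ r ∈ g, (r.length : Int) ≤ t.foldl max a := by
      intro r hr
      have hmem : (r.length : Int) ∈ a :: t := by
        rw [← hmap]; exact List.mem_map.mpr ⟨r, hr, rfl⟩
      rcases List.mem_cons.mp hmem with heq | hmem
      · rw [heq]; exact pvFoldl_max_ge_init t a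
      · exact pvFoldl_max_ge_mem t a _ hmem
    set W := t.foldl max a with hWdef
    simp only [hW, Option.getD_some]
    -- the extremes
    have hm_mem : xr.foldl min x0 ∈ pvXs g := by rw [hX]; exact pvFoldl_min_mem xr x0
    have hM_mem : xr.foldl max x0 ∈ pvXs g := by rw [hX]; exact pvFoldl_max_mem xr x0
    have hm0 : 0 ≤ xr.foldl min x0 := pvXs_nonneg g _ hm_mem
    have hM0 : 0 ≤ xr.foldl max x0 := pvXs_nonneg g _ hM_mem
    have hmW : xr.foldl min x0 < W := pvXs_lt_width g W hWbound _ hm_mem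
    have hMW : xr.foldl max x0 < W := pvXs_lt_width g W hWbound _ hM_mem
    have hmin_le : ∀ x, 0 ≤ x → pvHit g x = true → xr.foldl min x0 ≤ x := by
      intro x hx0 hhit
      have hxm : x ∈ pvXs g := (pvHit_iff g x hx0).mp hhit
      rw [hX] at hxm
      rcases List.mem_cons.mp hxm with rfl | hxm
      · exact pvFoldl_min_le_init xr x
      · exact pvFoldl_min_le_mem xr x0 x hxm
    have hmax_ge : ∀ x, 0 ≤ x → pvHit g x = true → x ≤ xr.foldl max x0 := by
      intro x hx0 hhit
      have hxm : x ∈ pvXs g := (pvHit_iff g x hx0).mp hhit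
      rw [hX] at hxm
      rcases List.mem_cons.mp hxm with rfl | hxm
      · exact pvFoldl_max_ge_init xr x
      · exact pvFoldl_max_ge_mem xr x0 x hxm
    have hleft : pvFindLeft g 0 W.toNat = xr.foldl min x0 :=
      pvFindLeft_spec g _ ((pvHit_iff g _ hm0).mpr hm_mem) hmin_le hm0 W.toNat 0
        le_rfl hm0 (by omega)
    have hright : pvFindRight g (W - 1) W.toNat = xr.foldl max x0 :=
      pvFindRight_spec g _ ((pvHit_iff g _ hM0).mpr hM_mem) hmax_ge hM0 W.toNat (W - 1)
        (by omega) (by omega)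
    have htop : pvFindTop g 0 = y0 := pvFindTop_spec g 0 y0 yr hY
    have hbot : pvFindBottom g.reverse ((g.length : Int) - 1) = yr.getLastD y0 := by
      have := pvFindBottom_spec g 0 y0 (by rw [hY]; exact List.cons_ne_nil _ _)
      rw [hY, List.getLastD_cons] at this
      calc pvFindBottom g.reverse ((g.length : Int) - 1)
          = pvFindBottom g.reverse (0 + (g.length : Int) - 1) := by ring_nf
        _ = yr.getLastD y0 := this
    rw [htop, hbot, hleft, hright]

-- ===== VERDICT (by name: the statement is the Claim_ definition above) =====
theorem trim_grid_py_spec : Claim_unchanged_trim_grid_py := by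
  intro grid _ hnD
  show trim_grid_py grid = trim_grid_py_alt grid
  by_cases hg : grid = []
  · subst hg; decide
  · rcases hY : pvYs grid 0 with _ | ⟨y0, yr⟩
    · -- no content: both return (grid, none)
      have hXnil : pvXs grid = [] := (pvYs_nil_iff grid 0).mp hY
      rw [pvA_closed grid hg, hXnil]
      unfold trim_grid_py_alt
      rw [if_pos ((pvAny_iff grid 0).mpr hY)]
      simp
    · have hXne : pvXs grid ≠ [] := by
        intro h
        rw [(pvYs_nil_iff grid 0).mpr h] at hY
        cases hY
      rcases hX : pvXs grid with _ | ⟨x0, xr⟩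
      · exact absurd hX hXne
      · rw [pvA_closed grid hg, pvB_closed grid y0 yr x0 xr hY hX]
        have hx0 : x0 ∈ pvXs grid := by rw [hX]; exact List.mem_cons_self
        have h0x0 : 0 ≤ x0 := pvXs_nonneg grid x0 hx0
        have hy0mem : y0 ∈ pvYs grid 0 := by rw [hY]; exact List.mem_cons_self
        have hy0b := pvYs_bounds grid 0 y0 hy0mem
        have hpair : (y0 :: yr).Pairwise (· ≤ ·) := by
          rw [← hY]; exact pvYs_pairwise grid 0
        rw [hX, hY]
        have hmaxx : (x0 :: xr).foldl max (-1) = xr.foldl max x0 := by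
          show xr.foldl max (max (-1) x0) = xr.foldl max x0
          rw [max_eq_right (by omega : (-1 : Int) ≤ x0)]
        have hguard : ¬ ((x0 :: xr).foldl max (-1) = -1) := by
          rw [hmaxx]
          have := pvFoldl_max_ge_init xr x0
          omega
        rw [if_neg hguard]
        -- ¬ D_ with a nonempty truthy-cell list gives a truthy column ≤ width
        have hanygrid : (grid.any fun r => r.any fun x => decide (x ≠ 0)) = true := by
          rcases List.mem_flatMap.mp hx0 with ⟨r, hrg, hxr⟩
          rcases (pvMem_txs r x0).mp hxr with ⟨k, hk, hne0, _⟩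
          simp only [List.any_eq_true, decide_eq_true_eq]
          exact ⟨r, hrg, r[k], List.getElem_mem hk, hne0⟩
        have hnall : ¬ ((grid.all (fun r =>
            (r.take ((grid.headD []).length + 1)).all (· = 0))) = true) := by
          intro hall
          exact hnD ((pvD_char grid).mpr ⟨hanygrid, hall⟩)
        rw [pvD_iff] at hnall
        push_neg at hnall
        have hminx : (x0 :: xr).foldl min ((grid.headD []).length : Int)
            = xr.foldl min x0 := by
          show xr.foldl min (min ((grid.headD []).length : Int) x0) = xr.foldl min x0
          rw [pvFoldl_min_swap]
          refine min_eq_right ?_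
          rcases hnall with ⟨x, hxmem, hxle⟩
          rw [hX] at hxmem
          rcases List.mem_cons.mp hxmem with rfl | hxr
          · exact le_trans (pvFoldl_min_le_init xr x) hxle
          · exact le_trans (pvFoldl_min_le_mem xr x0 x hxr) hxle
        have hminy : (y0 :: yr).foldl min (grid.length : Int) = y0 := by
          show yr.foldl min (min (grid.length : Int) y0) = y0
          rw [pvFoldl_min_swap,
              pvFoldl_min_eq_init yr y0
                (fun y hy => (List.pairwise_cons.mp hpair).1 y hy)]
          exact min_eq_right (by rcases hy0b with ⟨_, hlt⟩; omega)
        have hmaxy : (y0 :: yr).foldl max (-1) = yr.getLastD y0 :=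
          pvFoldl_max_sorted yr y0 (-1) hpair (by omega)
        rw [hminx, hminy, hmaxy, hmaxx]

theorem trim_grid_py_changed : Claim_changed_trim_grid_py := by
  unfold Claim_changed_trim_grid_py
  exact ⟨by decide, by decide, by decide, by decide, by decide⟩

theorem trim_grid_py_tight : Claim_exact_trim_grid_py := by
  intro grid _ hD
  rcases (pvD_char grid).mp hD with ⟨hany, hall⟩
  have hg : grid ≠ [] := by rintro rfl; cases hany
  have hXne : pvXs grid ≠ [] := by
    simp only [List.any_eq_true, decide_eq_true_eq] at hany
    rcases hany with ⟨r, hrg, b, hbr, hb⟩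
    rcases List.getElem_of_mem hbr with ⟨k, hk, rfl⟩
    have hmem : ((k : Int)) ∈ pvXs grid :=
      List.mem_flatMap.mpr ⟨r, hrg, (pvMem_txs r k).mpr ⟨k, hk, hb, rfl⟩⟩
    exact List.ne_nil_of_mem hmem
  have hgt := (pvD_iff grid).mp hall
  rcases hX : pvXs grid with _ | ⟨x0, xr⟩
  · exact absurd hX hXne
  · have hYne : pvYs grid 0 ≠ [] := by
      intro h
      exact hXne ((pvYs_nil_iff grid 0).mp h)
    rcases hY : pvYs grid 0 with _ | ⟨y0, yr⟩
    · exact absurd hY hYne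
    · rw [pvA_closed grid hg, pvB_closed grid y0 yr x0 xr hY hX, hX]
      have hx0 : x0 ∈ pvXs grid := by rw [hX]; exact List.mem_cons_self
      have h0x0 : 0 ≤ x0 := pvXs_nonneg grid x0 hx0
      have hmaxx : (x0 :: xr).foldl max (-1) = xr.foldl max x0 := by
        show xr.foldl max (max (-1) x0) = xr.foldl max x0
        rw [max_eq_right (by omega : (-1 : Int) ≤ x0)]
      have hguard : ¬ ((x0 :: xr).foldl max (-1) = -1) := by
        rw [hmaxx]
        have := pvFoldl_max_ge_init xr x0
        omega
      rw [if_neg hguard]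
      -- A's min_x is stuck at the width initialiser; B's true minimum exceeds it
      have hminxA : (x0 :: xr).foldl min ((grid.headD []).length : Int)
          = ((grid.headD []).length : Int) :=
        pvFoldl_min_eq_init (x0 :: xr) _
          (fun x hx => le_of_lt (hgt x (by rw [hX]; exact hx)))
      have hminxB : ((grid.headD []).length : Int) < xr.foldl min x0 :=
        pvFoldl_min_gt xr x0 _ (hgt x0 hx0)
          (fun x hx => hgt x (by rw [hX]; exact List.mem_cons_of_mem _ hx))
      intro heq
      rw [hminxA] at heq
      have h2 := congrArg (fun p => p.2) heq
      simp only [Option.some.injEq, Prod.mk.injEq] at h2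
      rcases h2 with ⟨hmx, _⟩
      omega
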